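-- pv_equiv track=rewrite | github.com/carlosduelo/adventofcode | 2015/day8/solver.py | compute_len2
-- ===== SOURCE A (Python) =====
-- def compute_len2(word):
--     l = 2
--     for c in word:
--         if c == '"':
--             l += 2
--         elif c == "'":
--             l += 2
--         elif c == "\\":
--             l += 2
--         else:
--             l += 1
--     return l
-- ===== SOURCE B (Python) =====
-- def compute_len2(word):
--     return 2 + len(word) + word.count('"') + word.count("'") + word.count("\\")
-- ===== Notes on version B (the rewrite author's own statement) =====
-- stated objective: simpler
-- what changed: Replaced the incrementing per-character branch loop by a closed form: base length 2 + len(word) plus three str.count scans for the escaped characters; the interpreted per-char loop becomes C-level len/count calls.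
import Mathlib
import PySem

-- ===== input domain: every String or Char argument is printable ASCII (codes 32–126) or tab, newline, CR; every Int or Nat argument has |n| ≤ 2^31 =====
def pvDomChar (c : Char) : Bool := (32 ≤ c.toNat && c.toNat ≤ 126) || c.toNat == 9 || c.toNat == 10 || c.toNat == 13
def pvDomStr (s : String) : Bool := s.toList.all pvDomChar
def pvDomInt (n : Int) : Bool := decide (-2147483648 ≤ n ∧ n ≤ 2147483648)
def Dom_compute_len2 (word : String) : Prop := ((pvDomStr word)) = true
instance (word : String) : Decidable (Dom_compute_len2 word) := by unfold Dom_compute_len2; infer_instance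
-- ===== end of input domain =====

-- B replaces A's incrementing branch loop by the closed form 2 + len + three character counts (simpler decomposition, same O(n)).

-- ===== PORT A =====
def compute_len2 (word : String) : Int :=
  word.toList.foldl
    (fun l c =>
      if c == '"' then l + 2
      else if c == '\'' then l + 2
      else if c == '\\' then l + 2
      else l + 1)
    2

-- ===== PORT B =====
def compute_len2_alt (word : String) : Int :=
  2 + (PySem.Str.len word) + (PySem.Str.count word "\"" : Int)
    + (PySem.Str.count word "'" : Int) + (PySem.Str.count word "\\" : Int)

-- ===== PRECONDITION & SPEC =====
def Spec_compute_len2 (word : String) (out : Int) : Prop := out = compute_len2_alt word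
instance (word : String) (out : Int) : Decidable (Spec_compute_len2 word out) := by unfold Spec_compute_len2; infer_instance

-- ===== CLAIM (what is proved, stated in full; the proofs are below) =====
def Claim_equal_compute_len2 : Prop := ∀ (word : String), Dom_compute_len2 word → Spec_compute_len2 word (compute_len2 word)

-- ===== LEMMAS AND PROOFS =====

-- Python's s.count(c) for a single character c is the plain character count.
theorem chars_count_go_singleton (c : Char) : ∀ (fuel : Nat) (s : List Char) (acc : Nat),
    s.length ≤ fuel → PySem.Chars.count.go [c] fuel s acc = acc + s.count c := by
  intro fuel
  induction fuel with
  | zero =>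
    intro s acc h
    have : s = [] := List.eq_nil_of_length_eq_zero (Nat.le_zero.mp h)
    subst this
    simp [PySem.Chars.count.go]
  | succ n ih =>
    intro s acc h
    cases s with
    | nil => simp [PySem.Chars.count.go]
    | cons x t =>
      by_cases hx : x = c
      · subst hx
        have : List.isPrefixOf [x] (x :: t) = true := by simp [List.isPrefixOf]
        simp only [PySem.Chars.count.go, this, if_pos]
        have ht : t.length ≤ n := by simpa using h
        rw [show List.drop (List.length [x]) (x :: t) = t by simp]
        rw [ih t (acc + 1) ht]
        simp
        omega
      · have : List.isPrefixOf [c] (x :: t) = false := by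
          simp [List.isPrefixOf]
          exact fun hc => (hx hc.symm).elim
        simp only [PySem.Chars.count.go, this]
        have ht : t.length ≤ n := by simpa using h
        rw [if_neg (by simp)]
        rw [ih t acc ht]
        rw [List.count_cons_of_ne (by exact fun hc => hx hc)]

theorem chars_count_singleton (s : List Char) (c : Char) :
    PySem.Chars.count s [c] = s.count c := by
  simp [PySem.Chars.count, List.isEmpty]
  simpa using chars_count_go_singleton c s.length s 0 (le_refl _)

-- A's loop over a list computes start + length + count '"' + count '\'' + count '\\'.
theorem loopA_eq (l : List Char) : ∀ (a : Int),
    l.foldl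
      (fun l c =>
        if c == '"' then l + 2
        else if c == '\'' then l + 2
        else if c == '\\' then l + 2
        else l + 1) a
    = a + l.length + (l.count '"' : Int) + (l.count '\'' : Int) + (l.count '\\' : Int) := by
  induction l with
  | nil => intro a; simp
  | cons x t ih =>
    intro a
    simp only [List.foldl_cons, ih]
    by_cases h1 : x = '"'
    · subst h1; simp; ring
    · by_cases h2 : x = '\''
      · subst h2; simp; ring
      · by_cases h3 : x = '\\'
        · subst h3; simp [h1]; ring
        · simp [h1, h2, h3]; ring

-- ===== VERDICT (by name: the statement is the Claim_ definition above) =====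
theorem compute_len2_spec : Claim_equal_compute_len2 := by
  intro word _
  unfold Spec_compute_len2 compute_len2 compute_len2_alt
  rw [loopA_eq]
  simp [PySem.Str.count_eq, PySem.Str.len, chars_count_singleton]
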